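-- pv_equiv track=rewrite | github.com/Uncommonness/auto_tour_agent | scripts/simple_rag_chatbot.py | plan_itinerary
-- ===== SOURCE A (Python) =====
-- from collections import defaultdict
-- from typing import List, Dict
--
-- def categorize_places(places: List[Dict[str, str]]) -> Dict[str, List[Dict[str, str]]]:
--     grouped = defaultdict(list)
--     for p in places:
--         kinds = (p.get('kinds') or '').split(',')
--         for k in kinds:
--             grouped[k.strip()].append(p)
--     return grouped
--
-- def plan_itinerary(places: List[Dict[str, str]], days: int = 1) -> List[List[Dict[str, str]]]:
--     groups = categorize_places(places)
--     attractions = groups.get('interesting_places', [])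
--     restaurants = groups.get('restaurants', [])
--     hotels = groups.get('accomodations', [])
--
--     itinerary = []
--     for day in range(days):
--         day_plan = []
--         if day < len(attractions):
--             day_plan.append(attractions[day])
--         if day < len(restaurants):
--             day_plan.append(restaurants[day])
--         if day < len(hotels):
--             day_plan.append(hotels[day])
--         itinerary.append(day_plan)
--     return itinerary
-- ===== SOURCE B (Python) =====
-- def _collect(places, cat):
--     return [p for p in places
--               for k in (p.get('kinds') or '').split(',')
--               if k.strip() == cat]
--
-- def plan_itinerary(places, days=1):
--     lists = [_collect(places, c)
--              for c in ('interesting_places', 'restaurants', 'accomodations')]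
--     return [[lst[d] for lst in lists if d < len(lst)] for d in range(days)]
-- ===== Notes on version B (the rewrite author's own statement) =====
-- stated objective: simpler
-- what changed: Replaces the defaultdict grouping over all kind tokens plus per-day append chain with three targeted comprehension scans (one per needed category) and a per-day comprehension over that list of three lists.
import Mathlib
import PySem

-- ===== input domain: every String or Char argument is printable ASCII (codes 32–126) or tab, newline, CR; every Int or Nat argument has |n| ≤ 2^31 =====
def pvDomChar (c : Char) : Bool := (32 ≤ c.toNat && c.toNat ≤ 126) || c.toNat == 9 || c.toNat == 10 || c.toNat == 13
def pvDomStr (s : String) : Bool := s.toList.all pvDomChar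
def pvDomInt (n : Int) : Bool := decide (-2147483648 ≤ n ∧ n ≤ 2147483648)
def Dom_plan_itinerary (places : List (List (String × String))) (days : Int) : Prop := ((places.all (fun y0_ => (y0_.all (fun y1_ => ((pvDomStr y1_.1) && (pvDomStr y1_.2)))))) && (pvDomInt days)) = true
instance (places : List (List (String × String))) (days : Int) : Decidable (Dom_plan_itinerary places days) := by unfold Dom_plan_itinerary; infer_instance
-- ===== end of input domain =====

-- B is simpler: three targeted comprehension scans (one per needed category) replace the
-- defaultdict grouping over all kind tokens, and a per-day comprehension replaces the append chain.

-- ===== PORT A =====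
-- (p.get('kinds') or '').split(',') — 'or' only replaces None by '' (and '' by itself), so getD "" is exact
def pvKindTokens (p : List (String × String)) : List (List Char) :=
  PySem.Chars.splitOn (((PySem.Dict.mk p).get? "kinds").getD "").toList ",".toList

-- categorize_places: grouped = defaultdict(list); grouped[k.strip()].append(p)
def categorize_places (places : List (List (String × String))) :
    PySem.Dict (List Char) (List (List (String × String))) :=
  places.foldl (fun grouped p =>
    (pvKindTokens p).foldl
      (fun grouped k => grouped.modify (PySem.Chars.strip k) [] (· ++ [p])) grouped)
    PySem.Dict.empty

def plan_itinerary (places : List (List (String × String))) (days : Int) :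
    List (List (List (String × String))) :=
  let groups := categorize_places places
  let attractions := (groups.get? "interesting_places".toList).getD []
  let restaurants := (groups.get? "restaurants".toList).getD []
  let hotels := (groups.get? "accomodations".toList).getD []
  (PySem.List.pyRange 0 days 1).foldl (fun itinerary day =>
    let day_plan : List (List (String × String)) := []
    let day_plan := if day < (attractions.length : Int)
      then day_plan ++ [PySem.List.pyGetD attractions day []] else day_plan
    let day_plan := if day < (restaurants.length : Int)
      then day_plan ++ [PySem.List.pyGetD restaurants day []] else day_plan
    let day_plan := if day < (hotels.length : Int)
      then day_plan ++ [PySem.List.pyGetD hotels day []] else day_plan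
    itinerary ++ [day_plan]) []

-- ===== PORT B =====
-- _collect: one targeted scan, one copy of p per kind token whose strip equals cat
def pvCollect (places : List (List (String × String))) (cat : List Char) :
    List (List (String × String)) :=
  places.flatMap (fun p =>
    ((PySem.Chars.splitOn (((PySem.Dict.mk p).get? "kinds").getD "").toList ",".toList).filter
      (fun k => PySem.Chars.strip k == cat)).map (fun _ => p))

def plan_itinerary_alt (places : List (List (String × String))) (days : Int) :
    List (List (List (String × String))) :=
  let lists := [pvCollect places "interesting_places".toList,
                pvCollect places "restaurants".toList,
                pvCollect places "accomodations".toList]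
  (PySem.List.pyRange 0 days 1).map (fun d =>
    (lists.filter (fun lst => d < (lst.length : Int))).map
      (fun lst => PySem.List.pyGetD lst d []))

-- ===== PRECONDITION & SPEC =====
def Spec_plan_itinerary (places : List (List (String × String))) (days : Int) (out : List (List (List (String × String)))) : Prop := out = plan_itinerary_alt places days
instance (places : List (List (String × String))) (days : Int) (out : List (List (List (String × String)))) : Decidable (Spec_plan_itinerary places days out) := by unfold Spec_plan_itinerary; infer_instance

-- ===== CLAIM (what is proved, stated in full; the proofs are below) =====
def Claim_equal_plan_itinerary : Prop := ∀ (places : List (List (String × String))) (days : Int), Dom_plan_itinerary places days → Spec_plan_itinerary places days (plan_itinerary places days)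

-- ===== LEMMAS AND PROOFS =====

-- A's grouping dict, looked up at any category, is exactly B's targeted scan.
theorem categorize_getD (places : List (List (String × String))) (cat : List Char) :
    ((categorize_places places).get? cat).getD [] = pvCollect places cat := by
  rw [← PySem.Dict.getD_eq_get?_getD]
  unfold categorize_places
  have h1 : ∀ (g : PySem.Dict (List Char) (List (List (String × String))))
      (p : List (String × String)),
      (pvKindTokens p).foldl
        (fun grouped k => grouped.modify (PySem.Chars.strip k) [] (· ++ [p])) g
      = ((pvKindTokens p).map (fun k => (PySem.Chars.strip k, p))).foldl
        (fun grouped q => grouped.modify q.1 [] (· ++ [q.2])) g := by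
    intro g p
    rw [List.foldl_map]
  simp only [h1]
  rw [← List.foldl_flatMap]
  rw [PySem.Dict.getD_foldl_modify_append]
  simp [pvCollect, pvKindTokens, List.filter_flatMap, List.filter_map,
    List.map_flatMap, List.map_map, Function.comp_def]

-- A's three chained appends for one day equal B's filter-then-index over the three lists.
theorem dayplan_eq {α : Type} (a r h : List α) (d : Int) (dflt : α) :
    (let dp : List α := []
     let dp := if d < (a.length : Int) then dp ++ [PySem.List.pyGetD a d dflt] else dp
     let dp := if d < (r.length : Int) then dp ++ [PySem.List.pyGetD r d dflt] else dp
     let dp := if d < (h.length : Int) then dp ++ [PySem.List.pyGetD h d dflt] else dp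
     dp)
    = ([a, r, h].filter (fun lst => d < (lst.length : Int))).map
        (fun lst => PySem.List.pyGetD lst d dflt) := by
  by_cases h1 : d < (a.length : Int) <;> by_cases h2 : d < (r.length : Int) <;>
    by_cases h3 : d < (h.length : Int) <;> simp [List.filter, h1, h2, h3]

-- ===== VERDICT (by name: the statement is the Claim_ definition above) =====
theorem plan_itinerary_spec : Claim_equal_plan_itinerary := by
  intro places days _
  unfold Spec_plan_itinerary plan_itinerary plan_itinerary_alt
  simp only [categorize_getD]
  rw [PySem.List.foldl_append_singleton_eq_map]
  simp only [List.nil_append]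
  apply List.map_congr_left
  intro d _
  exact dayplan_eq _ _ _ d []
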